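-- pv_equiv track=rewrite | github.com/anisha-singhal-1/Mini-Projects | Translation.py | mRNAtoProteins
-- ===== SOURCE A (Python) =====
-- def mRNAtoProteins(codons):
--
--     if len(codons) % 3 != 0:
--         length = len(codons)
--         new_length = length - (length % 3)
--         codons = codons[:new_length]
--
--
--     AAcode = {"UUU": "F", "UUC": "F", "UUA": "L", "UUG": "L",
--               "UCU": "S", "UCC": "S", "UCA": "S", "UCG": "S",
--               "UAU": "Y", "UAC": "Y", "UAA": "—", "UAG": "—",
--               "UGU": "C", "UGC": "C", "UGA": "—", "UGG": "W",
--               "CUU": "L", "CUC": "L", "CUA": "L", "CUG": "L",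
--               "CCU": "P", "CCC": "P", "CCA": "P", "CCG": "P",
--               "CAU": "H", "CAC": "H", "CAA": "Q", "CAG": "Q",
--               "CGU": "R", "CGC": "R", "CGA": "R", "CGG": "R",
--               "AUU": "I", "AUC": "I", "AUA": "I", "AUG": "M",
--               "ACU": "T", "ACC": "T", "ACA": "T", "ACG": "T",
--               "AAU": "N", "AAC": "N", "AAA": "K", "AAG": "K",
--               "AGU": "S", "AGC": "S", "AGA": "R", "AGG": "R",
--               "GUU": "V", "GUC": "V", "GUA": "V", "GUG": "V",
--               "GCU": "A", "GCC": "A", "GCA": "A", "GCG": "A",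
--               "GAU": "D", "GAC": "D", "GAA": "E", "GAG": "E",
--               "GGU": "G", "GGC": "G", "GGA": "G", "GGG": "G"}
--
--     proteins = ''
--     for i in range(0, len(codons), 3):
--         codon = codons[i:i+3]
--         proteins += AAcode[codon]
--
--     return proteins
-- ===== SOURCE B (Python) =====
-- def mRNAtoProteins(codons):
--     bases = "UCAG"
--     aa = ("FFLLSSSSYY\u2014\u2014CC\u2014W"
--           "LLLLPPPPHHQQRRRR"
--           "IIIMTTTTNNKKSSRR"
--           "VVVVAAAADDEEGGGG")
--     out = []
--     for i in range(0, len(codons) - len(codons) % 3, 3):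
--         k = (16 * bases.index(codons[i])
--              + 4 * bases.index(codons[i + 1])
--              + bases.index(codons[i + 2]))
--         out.append(aa[k])
--     return ''.join(out)
-- ===== Notes on version B (the rewrite author's own statement) =====
-- stated objective: alternative
-- what changed: Replaces the flat 64-entry codon dictionary by a 64-character amino-acid string indexed arithmetically: each base is mapped to 0..3 via its position in the 4-letter base alphabet and the codon's residue is aa[16*b1+4*b2+b3], with the loop ranging directly over the truncated length instead of truncating the string first.
import Mathlib
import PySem

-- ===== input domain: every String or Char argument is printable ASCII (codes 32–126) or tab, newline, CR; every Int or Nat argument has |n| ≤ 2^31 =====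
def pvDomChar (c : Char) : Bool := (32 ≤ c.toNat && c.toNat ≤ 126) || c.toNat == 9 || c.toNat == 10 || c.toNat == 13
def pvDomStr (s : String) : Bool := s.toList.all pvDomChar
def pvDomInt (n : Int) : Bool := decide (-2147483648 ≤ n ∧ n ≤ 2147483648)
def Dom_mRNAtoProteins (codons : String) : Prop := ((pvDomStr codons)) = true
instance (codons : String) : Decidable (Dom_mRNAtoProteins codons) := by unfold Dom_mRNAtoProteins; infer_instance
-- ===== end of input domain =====

-- B replaces A's flat 64-entry codon dictionary by a 64-character amino-acid table indexed
-- arithmetically (base -> 0..3 via "UCAG".index, residue = aa[16*b1+4*b2+b3]) and loops over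
-- the truncated length directly instead of truncating the string (objective: alternative).

-- ===== PORT A =====
def pvAAcode : PySem.Dict (List Char) (List Char) := PySem.Dict.ofList [
  (['U','U','U'], ['F']),
  (['U','U','C'], ['F']),
  (['U','U','A'], ['L']),
  (['U','U','G'], ['L']),
  (['U','C','U'], ['S']),
  (['U','C','C'], ['S']),
  (['U','C','A'], ['S']),
  (['U','C','G'], ['S']),
  (['U','A','U'], ['Y']),
  (['U','A','C'], ['Y']),
  (['U','A','A'], ['—']),
  (['U','A','G'], ['—']),
  (['U','G','U'], ['C']),
  (['U','G','C'], ['C']),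
  (['U','G','A'], ['—']),
  (['U','G','G'], ['W']),
  (['C','U','U'], ['L']),
  (['C','U','C'], ['L']),
  (['C','U','A'], ['L']),
  (['C','U','G'], ['L']),
  (['C','C','U'], ['P']),
  (['C','C','C'], ['P']),
  (['C','C','A'], ['P']),
  (['C','C','G'], ['P']),
  (['C','A','U'], ['H']),
  (['C','A','C'], ['H']),
  (['C','A','A'], ['Q']),
  (['C','A','G'], ['Q']),
  (['C','G','U'], ['R']),
  (['C','G','C'], ['R']),
  (['C','G','A'], ['R']),
  (['C','G','G'], ['R']),
  (['A','U','U'], ['I']),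
  (['A','U','C'], ['I']),
  (['A','U','A'], ['I']),
  (['A','U','G'], ['M']),
  (['A','C','U'], ['T']),
  (['A','C','C'], ['T']),
  (['A','C','A'], ['T']),
  (['A','C','G'], ['T']),
  (['A','A','U'], ['N']),
  (['A','A','C'], ['N']),
  (['A','A','A'], ['K']),
  (['A','A','G'], ['K']),
  (['A','G','U'], ['S']),
  (['A','G','C'], ['S']),
  (['A','G','A'], ['R']),
  (['A','G','G'], ['R']),
  (['G','U','U'], ['V']),
  (['G','U','C'], ['V']),
  (['G','U','A'], ['V']),
  (['G','U','G'], ['V']),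
  (['G','C','U'], ['A']),
  (['G','C','C'], ['A']),
  (['G','C','A'], ['A']),
  (['G','C','G'], ['A']),
  (['G','A','U'], ['D']),
  (['G','A','C'], ['D']),
  (['G','A','A'], ['E']),
  (['G','A','G'], ['E']),
  (['G','G','U'], ['G']),
  (['G','G','C'], ['G']),
  (['G','G','A'], ['G']),
  (['G','G','G'], ['G'])]
def mRNAtoProteins (codons : String) : String :=
  let cs0 := codons.toList
  let cs := if PySem.Int.mod (cs0.length : Int) 3 ≠ 0 then
      PySem.List.slice cs0 none (some ((cs0.length : Int) - PySem.Int.mod (cs0.length : Int) 3))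
    else cs0
  let proteins := (PySem.List.pyRange 0 (cs.length : Int) 3).foldl
      (fun (o : Option (List Char)) i =>
        o.bind fun p => (pvAAcode.get? (PySem.List.slice cs (some i) (some (i + 3)))).map (fun x => p ++ x))
      (some [])
  -- a failed dict lookup (KeyError) is modelled by `none`; Pre_ excludes those inputs
  String.ofList (proteins.getD [])

-- ===== PORT B =====
-- bases = "UCAG"
def pvBases : List Char := ['U', 'C', 'A', 'G']
-- the 64-character amino-acid table, row-major in base order U,C,A,G
def pvAA : List Char :=
  ['F','F','L','L','S','S','S','S','Y','Y','—','—','C','C','—','W',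
   'L','L','L','L','P','P','P','P','H','H','Q','Q','R','R','R','R',
   'I','I','I','M','T','T','T','T','N','N','K','K','S','S','R','R',
   'V','V','V','V','A','A','A','A','D','D','E','E','G','G','G','G']

-- aa[16*bases.index(a) + 4*bases.index(b) + bases.index(c)]; a failed .index (ValueError)
-- or out-of-range aa[k] is modelled by `none`
def pvCodonB (a b c : Char) : Option Char :=
  (PySem.List.index? pvBases a).bind fun ia =>
  (PySem.List.index? pvBases b).bind fun ib =>
  (PySem.List.index? pvBases c).bind fun ic =>
  PySem.List.pyGet? pvAA (16 * (ia : Int) + 4 * (ib : Int) + (ic : Int))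

def mRNAtoProteins_alt (codons : String) : String :=
  let cs := codons.toList
  let out := (PySem.List.pyRange 0 ((cs.length : Int) - PySem.Int.mod (cs.length : Int) 3) 3).foldl
      (fun (o : Option (List Char)) i =>
        o.bind fun p =>
          ((PySem.List.pyGet? cs i).bind fun a =>
           (PySem.List.pyGet? cs (i + 1)).bind fun b =>
           (PySem.List.pyGet? cs (i + 2)).bind fun c =>
           pvCodonB a b c).map fun ch => p ++ [ch])
      (some [])
  String.ofList (out.getD [])

-- ===== PRECONDITION & SPEC =====
-- A raises KeyError on any codon (3-char chunk of the truncated string) not made of bases U/C/A/G;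
-- Pre_ admits exactly the strings whose truncated prefix consists of those four bases.
def Pre_mRNAtoProteins (codons : String) : Prop :=
  (codons.toList.take (codons.toList.length - codons.toList.length % 3)).all
    (fun c => c == 'U' || c == 'C' || c == 'A' || c == 'G') = true
instance (codons : String) : Decidable (Pre_mRNAtoProteins codons) := by
  unfold Pre_mRNAtoProteins; infer_instance

def pvWitness_mRNAtoProteins : String := "AUG"

def Spec_mRNAtoProteins (codons : String) (out : String) : Prop := out = mRNAtoProteins_alt codons
instance (codons : String) (out : String) : Decidable (Spec_mRNAtoProteins codons out) := by
  unfold Spec_mRNAtoProteins; infer_instance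

-- ===== CLAIM (what is proved, stated in full; the proofs are below) =====
def Claim_equal_mRNAtoProteins : Prop := ∀ (codons : String), Dom_mRNAtoProteins codons → Pre_mRNAtoProteins codons → Spec_mRNAtoProteins codons (mRNAtoProteins codons)

-- ===== LEMMAS AND PROOFS =====

def pvChunks : List Char → List (List Char)
  | a :: b :: c :: r => (pvAAcode.get? [a, b, c]).getD [] :: pvChunks r
  | _ => []

set_option maxRecDepth 8192 in
set_option maxHeartbeats 2000000 in
lemma pvCodon_agree (a b c : Char)
    (ha : a = 'U' ∨ a = 'C' ∨ a = 'A' ∨ a = 'G')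
    (hb : b = 'U' ∨ b = 'C' ∨ b = 'A' ∨ b = 'G')
    (hc : c = 'U' ∨ c = 'C' ∨ c = 'A' ∨ c = 'G') :
    (pvCodonB a b c).map (fun ch => [ch]) = pvAAcode.get? [a, b, c] ∧ (pvCodonB a b c).isSome := by
  rcases ha with rfl | rfl | rfl | rfl <;> rcases hb with rfl | rfl | rfl | rfl <;>
    rcases hc with rfl | rfl | rfl | rfl <;> exact ⟨by decide, by decide⟩

lemma pvTruncSlice (cs : List Char) :
    PySem.List.slice cs none (some ((cs.length : Int) - PySem.Int.mod (cs.length : Int) 3))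
      = cs.take (cs.length - cs.length % 3) := by
  have hmod : PySem.Int.mod (cs.length : Int) 3 = ((cs.length % 3 : Nat) : Int) := by
    exact_mod_cast PySem.Int.mod_natCast cs.length 3
  have hle : cs.length % 3 ≤ cs.length := Nat.mod_le _ _
  have h : ((cs.length : Int) - PySem.Int.mod (cs.length : Int) 3)
      = ((cs.length - cs.length % 3 : Nat) : Int) := by rw [hmod]; omega
  rw [h, PySem.List.slice_to_natCast]

lemma pvTruncA (cs : List Char) :
    (if PySem.Int.mod (cs.length : Int) 3 ≠ 0 then
        PySem.List.slice cs none (some ((cs.length : Int) - PySem.Int.mod (cs.length : Int) 3))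
      else cs)
      = cs.take (cs.length - cs.length % 3) := by
  have hmod : PySem.Int.mod (cs.length : Int) 3 = ((cs.length % 3 : Nat) : Int) := by
    exact_mod_cast PySem.Int.mod_natCast cs.length 3
  split_ifs with h
  · exact pvTruncSlice cs
  · have h0 : cs.length % 3 = 0 := by
      rw [hmod] at h; exact_mod_cast not_not.mp h
    rw [h0, Nat.sub_zero, List.take_length]

lemma pvRange3_nil (a b : Int) (h : b ≤ a) : PySem.List.pyRange a b 3 = [] := by
  rw [PySem.List.pyRange_of_pos a b (by norm_num)]
  simp [Int.not_lt.mpr h]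

lemma pvRange3_cons (a b : Int) (h : a < b) :
    PySem.List.pyRange a b 3 = a :: PySem.List.pyRange (a + 3) b 3 := by
  rw [PySem.List.pyRange_of_pos a b (by norm_num),
      PySem.List.pyRange_of_pos (a + 3) b (by norm_num)]
  by_cases h2 : a + 3 < b
  · have hcount : (if a < b then ((b - a + 3 - 1) / 3).toNat else 0)
        = (if a + 3 < b then ((b - (a + 3) + 3 - 1) / 3).toNat else 0) + 1 := by
      rw [if_pos h, if_pos h2]; omega
    rw [hcount, List.range_succ_eq_map]
    simp only [List.map_cons, List.map_map]
    refine congrArg₂ _ (by ring) (List.map_congr_left ?_)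
    intro k _; simp [Function.comp]; ring
  · have hcount : (if a < b then ((b - a + 3 - 1) / 3).toNat else 0) = 1 := by
      rw [if_pos h]; omega
    rw [hcount, if_neg h2]
    simp

-- pyGet? of a list with a known prefix, at prefix-length + k
lemma pvGetPre (pre s : List Char) (k : Nat) :
    PySem.List.pyGet? (pre ++ s) ((pre.length : Int) + (k : Int)) = s[k]? := by
  have h : ((pre.length : Int) + (k : Int)) = ((pre.length + k : Nat) : Int) := by push_cast; ring
  rw [h, PySem.List.pyGet?_natCast, List.getElem?_append_right (by omega)]
  congr 1
  omega

lemma pvFoldA (u : List Char) : ∀ (pre acc : List Char),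
    u.length % 3 = 0 →
    (∀ c ∈ u, c = 'U' ∨ c = 'C' ∨ c = 'A' ∨ c = 'G') →
    (PySem.List.pyRange (pre.length : Int) ((pre.length : Int) + (u.length : Int)) 3).foldl
      (fun (o : Option (List Char)) i =>
        o.bind fun p =>
          (pvAAcode.get? (PySem.List.slice (pre ++ u) (some i) (some (i + 3)))).map
            (fun x => p ++ x))
      (some acc)
    = some (acc ++ (pvChunks u).flatten) := by
  induction u using pvChunks.induct with
  | case1 a b c r ih =>
    intro pre acc hlen hv
    obtain ⟨hagree, hcs⟩ := pvCodon_agree a b c (hv a (by simp)) (hv b (by simp)) (hv c (by simp))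
    obtain ⟨ch0, hch0⟩ := Option.isSome_iff_exists.mp hcs
    have hv' : pvAAcode.get? [a, b, c] = some [ch0] := by rw [← hagree, hch0]; rfl
    set v : List Char := [ch0] with hvdef
    have hr : r.length % 3 = 0 := by simp [List.length_cons] at hlen; omega
    have hlt : (pre.length : Int) < (pre.length : Int) + ((a :: b :: c :: r).length : Int) := by
      simp [List.length_cons]; omega
    rw [pvRange3_cons _ _ hlt, List.foldl_cons]
    have hsl : PySem.List.slice (pre ++ a :: b :: c :: r) (some (pre.length : Int))
        (some ((pre.length : Int) + 3)) = [a, b, c] := by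
      have h := PySem.List.slice_natCast_add (pre ++ a :: b :: c :: r) pre.length 3
      norm_num at h
      exact h
    rw [hsl, hv', Option.bind_some, Option.map_some]
    have happ : pre ++ a :: b :: c :: r = (pre ++ [a, b, c]) ++ r := by simp
    have hidx : (pre.length : Int) + 3 = (((pre ++ [a, b, c]).length : Nat) : Int) := by
      simp [List.length_append]
    have hup : (pre.length : Int) + ((a :: b :: c :: r).length : Int)
        = (((pre ++ [a, b, c]).length : Nat) : Int) + (r.length : Int) := by
      simp [List.length_append, List.length_cons]; omega
    rw [happ, hidx, hup, ih (pre ++ [a, b, c]) (acc ++ v) hr (fun x hx => hv x (by simp [hx]))]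
    simp [pvChunks, hv']
  | case2 x h =>
    intro pre acc hlen hv
    match x, h with
    | [], _ =>
      rw [show ((([] : List Char).length : Int)) = 0 by simp, add_zero,
          pvRange3_nil _ _ le_rfl]
      simp [pvChunks]
    | [a], h => simp at hlen
    | [a, b], h => simp at hlen
    | a :: b :: c :: r, h => exact absurd rfl (h a b c r)

lemma pvFoldB (u : List Char) : ∀ (pre rest acc : List Char),
    u.length % 3 = 0 →
    (∀ c ∈ u, c = 'U' ∨ c = 'C' ∨ c = 'A' ∨ c = 'G') →
    (PySem.List.pyRange (pre.length : Int) ((pre.length : Int) + (u.length : Int)) 3).foldl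
      (fun (o : Option (List Char)) i =>
        o.bind fun p =>
          ((PySem.List.pyGet? (pre ++ u ++ rest) i).bind fun a =>
           (PySem.List.pyGet? (pre ++ u ++ rest) (i + 1)).bind fun b =>
           (PySem.List.pyGet? (pre ++ u ++ rest) (i + 2)).bind fun c =>
           pvCodonB a b c).map fun ch => p ++ [ch])
      (some acc)
    = some (acc ++ (pvChunks u).flatten) := by
  induction u using pvChunks.induct with
  | case1 a b c r ih =>
    intro pre rest acc hlen hv
    obtain ⟨hagree, hsome⟩ := pvCodon_agree a b c (hv a (by simp)) (hv b (by simp)) (hv c (by simp))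
    obtain ⟨ch, hch⟩ := Option.isSome_iff_exists.mp hsome
    have hdict : pvAAcode.get? [a, b, c] = some [ch] := by
      rw [← hagree, hch]; rfl
    have hr : r.length % 3 = 0 := by simp [List.length_cons] at hlen; omega
    have hlt : (pre.length : Int) < (pre.length : Int) + ((a :: b :: c :: r).length : Int) := by
      simp [List.length_cons]; omega
    rw [pvRange3_cons _ _ hlt, List.foldl_cons]
    have hs : pre ++ (a :: b :: c :: r) ++ rest = pre ++ (a :: b :: c :: (r ++ rest)) := by simp
    have hg0 : PySem.List.pyGet? (pre ++ (a :: b :: c :: r) ++ rest) (pre.length : Int) = some a := by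
      rw [hs, show ((pre.length : Int)) = (pre.length : Int) + ((0 : Nat) : Int) by simp,
          pvGetPre]
      rfl
    have hg1 : PySem.List.pyGet? (pre ++ (a :: b :: c :: r) ++ rest) ((pre.length : Int) + 1) = some b := by
      rw [hs, show ((pre.length : Int) + 1) = (pre.length : Int) + ((1 : Nat) : Int) by simp,
          pvGetPre]
      rfl
    have hg2 : PySem.List.pyGet? (pre ++ (a :: b :: c :: r) ++ rest) ((pre.length : Int) + 2) = some c := by
      rw [hs, show ((pre.length : Int) + 2) = (pre.length : Int) + ((2 : Nat) : Int) by norm_num,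
          pvGetPre]
      rfl
    rw [hg0, hg1, hg2]
    simp only [Option.bind_some]
    rw [hch, Option.map_some]
    have happ : pre ++ a :: b :: c :: r ++ rest = (pre ++ [a, b, c]) ++ r ++ rest := by simp
    have hidx : (pre.length : Int) + 3 = (((pre ++ [a, b, c]).length : Nat) : Int) := by
      simp [List.length_append]
    have hup : (pre.length : Int) + ((a :: b :: c :: r).length : Int)
        = (((pre ++ [a, b, c]).length : Nat) : Int) + (r.length : Int) := by
      simp [List.length_append, List.length_cons]; omega
    rw [happ, hidx, hup, ih (pre ++ [a, b, c]) rest (acc ++ [ch]) hr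
        (fun x hx => hv x (by simp [hx]))]
    simp [pvChunks, hdict]
  | case2 x h =>
    intro pre rest acc hlen hv
    match x, h with
    | [], _ =>
      rw [show ((([] : List Char).length : Int)) = 0 by simp, add_zero,
          pvRange3_nil _ _ le_rfl]
      simp [pvChunks]
    | [a], h => simp at hlen
    | [a, b], h => simp at hlen
    | a :: b :: c :: r, h => exact absurd rfl (h a b c r)

-- ===== VERDICT (by name: the statement is the Claim_ definition above) =====
theorem mRNAtoProteins_spec : Claim_equal_mRNAtoProteins := by
  intro codons _ hpre
  unfold Spec_mRNAtoProteins mRNAtoProteins mRNAtoProteins_alt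
  simp only [pvTruncA]
  set cs0 := codons.toList with hcs0
  set t := cs0.take (cs0.length - cs0.length % 3) with ht
  have htlen : t.length = cs0.length - cs0.length % 3 := by
    rw [ht, List.length_take]
    have := Nat.mod_le cs0.length 3
    omega
  have htmod : t.length % 3 = 0 := by omega
  have hv : ∀ c ∈ t, c = 'U' ∨ c = 'C' ∨ c = 'A' ∨ c = 'G' := by
    intro c hc
    have h := List.all_eq_true.mp hpre c hc
    simp only [Bool.or_eq_true, beq_iff_eq] at h
    tauto
  have hA := pvFoldA t [] [] htmod hv
  simp only [List.nil_append, List.length_nil, Nat.cast_zero, zero_add] at hA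
  rw [hA]
  have hstop : (cs0.length : Int) - PySem.Int.mod (cs0.length : Int) 3 = (t.length : Int) := by
    have hmod : PySem.Int.mod (cs0.length : Int) 3 = ((cs0.length % 3 : Nat) : Int) := by
      exact_mod_cast PySem.Int.mod_natCast cs0.length 3
    rw [hmod, htlen]
    have := Nat.mod_le cs0.length 3
    omega
  have hsplit : t ++ cs0.drop t.length = cs0 := by
    rw [htlen, ht]; exact List.take_append_drop _ _
  have hB := pvFoldB t [] (cs0.drop t.length) [] htmod hv
  simp only [List.nil_append, List.length_nil, Nat.cast_zero, zero_add] at hB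
  rw [hstop, ← hsplit, hB]
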